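-- pv_equiv track=rewrite | github.com/TheCatOfHs/sccop | src/core/grid_generate.py | check_assign
-- ===== SOURCE A (Python) =====
-- from collections import Counter
--
-- def check_assign(atom_num, symm_num_dict, assign):
--     """
--     check site assignment of different atom_num
--
--     Parameters
--     ----------
--     atom_num [dict, int:int]: number of different atoms\\
--     symm_num [dict, int:int]: number of each symmetry site\\
--     assign [dict, int:list]: site assignment of atom_num
--
--     Returns
--     ----------
--     save [int, 0d]: 0, right. 1, keep. 2, delete.
--     """
--     assign_num, site_used = {}, []
--     #check number of atom_num
--     save = 1
--     for atom in atom_num.keys():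
--         site = assign[atom]
--         num = sum(site)
--         if num <= atom_num[atom]:
--             assign_num[atom] = num
--             site_used += site
--         else:
--             save = 2
--             break
--     if save == 1:
--         #check number of used sites
--         site_used = Counter(site_used)
--         for site in site_used.keys():
--             if site_used[site] > symm_num_dict[site]:
--                 save = 2
--                 break
--         #whether find a right assignment
--         if assign_num == atom_num and save == 1:
--             save = 0
--     return save
-- ===== SOURCE B (Python) =====
-- def check_assign(atom_num, symm_num_dict, assign):
--     """
--     check site assignment of different atom_num
--     Returns 0 (right), 1 (keep) or 2 (delete).
--     Counter-free: one pass accumulates the total deficit (arithmetic replaces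
--     the dict-equality test) and the used sites, then the sorted site list is
--     scanned run by run against the symmetry limits (a missing symmetry site
--     counts as capacity 0, so it is reported as 2 instead of a KeyError).
--     """
--     deficit = 0
--     used = []
--     for atom, limit in atom_num.items():
--         gap = limit - sum(assign[atom])
--         if gap < 0:
--             return 2
--         deficit += gap
--         used.extend(assign[atom])
--     used.sort()
--     i, n = 0, len(used)
--     while i < n:
--         j = i
--         while j < n and used[j] == used[i]:
--             j += 1
--         if j - i > symm_num_dict.get(used[i], 0):
--             return 2
--         i = j
--     return 0 if deficit == 0 else 1
-- ===== Notes on version B (the rewrite author's own statement) =====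
-- stated objective: alternative
-- what changed: Replaces A's Counter and assign_num dict entirely: one pass accumulates a total integer deficit (sum of per-atom slack, zero iff the assignment is exact, replacing the dict-equality test) and the flat list of used sites, which is then sorted and scanned run by run against the symmetry limits (sort-then-scan run-length counting instead of a hash Counter).
import Mathlib
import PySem

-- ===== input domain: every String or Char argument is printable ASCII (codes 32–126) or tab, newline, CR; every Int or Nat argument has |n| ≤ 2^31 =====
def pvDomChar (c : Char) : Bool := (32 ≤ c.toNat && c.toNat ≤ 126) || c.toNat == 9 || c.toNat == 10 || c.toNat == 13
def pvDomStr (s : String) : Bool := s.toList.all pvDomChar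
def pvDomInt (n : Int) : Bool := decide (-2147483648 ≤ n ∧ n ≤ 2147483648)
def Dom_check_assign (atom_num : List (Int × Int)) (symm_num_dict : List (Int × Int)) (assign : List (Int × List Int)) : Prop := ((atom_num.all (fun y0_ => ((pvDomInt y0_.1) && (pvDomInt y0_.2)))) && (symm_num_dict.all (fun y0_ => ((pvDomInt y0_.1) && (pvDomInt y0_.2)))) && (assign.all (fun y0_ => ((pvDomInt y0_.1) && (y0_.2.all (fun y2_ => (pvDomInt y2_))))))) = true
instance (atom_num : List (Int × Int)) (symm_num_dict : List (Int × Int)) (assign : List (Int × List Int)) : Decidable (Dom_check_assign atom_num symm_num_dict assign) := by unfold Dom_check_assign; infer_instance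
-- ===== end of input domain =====

-- B drops A's Counter and assign_num dict: one pass accumulates the total deficit and the used
-- sites, then the sorted site list is scanned run by run against the symmetry limits; objective: alternative.

-- ===== PORT A =====
-- first loop of A: over atom_num.keys, accumulating assign_num and site_used, breaking with save=2
def caLoop1 (an : PySem.Dict Int Int) (ag : PySem.Dict Int (List Int)) :
    List Int → PySem.Dict Int Int → List Int → (PySem.Dict Int Int × List Int × Int)
  | [], anum, used => (anum, used, 1)
  | atom :: rest, anum, used =>
    let site := ag.getD atom []           -- assign[atom]; KeyError (excluded by Pre_) modelled by default []
    let num := site.sum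
    if num ≤ an.getD atom 0 then caLoop1 an ag rest (anum.insert atom num) (used ++ site)
    else (anum, used, 2)

-- second loop of A: over Counter(site_used).keys, breaking with save=2
def caLoop2 (cnt sy : PySem.Dict Int Int) : List Int → Int
  | [] => 1
  | s :: rest => if sy.getD s 0 < cnt.getD s 0 then 2 else caLoop2 cnt sy rest
    -- symm_num_dict[site]; KeyError (excluded by Pre_) modelled by default 0

-- Python's order-insensitive dict equality (assign_num == atom_num)
def pyDictEq (d1 d2 : PySem.Dict Int Int) : Bool :=
  PySem.Set.equal d1.keys d2.keys && d1.keys.all (fun k => d1.get? k == d2.get? k)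

def check_assign (atom_num : List (Int × Int)) (symm_num_dict : List (Int × Int)) (assign : List (Int × List Int)) : Int :=
  let an := PySem.Dict.ofList atom_num
  let sy := PySem.Dict.ofList symm_num_dict
  let ag := PySem.Dict.ofList assign
  let r := caLoop1 an ag an.keys PySem.Dict.empty []
  let save := r.2.2
  if save == 1 then
    let cnt := PySem.Dict.counter r.2.1
    let save := caLoop2 cnt sy cnt.keys
    if pyDictEq r.1 an && save == 1 then 0 else save
  else save

-- ===== PORT B =====
-- B's first loop: over atom_num.items(), accumulating the total deficit and the used-site list,
-- returning early (none) at the first over-assigned atom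
def cbPhase1 (ag : PySem.Dict Int (List Int)) :
    List (Int × Int) → Int → List Int → Option (Int × List Int)
  | [], deficit, used => some (deficit, used)
  | (atom, limit) :: rest, deficit, used =>
    let gap := limit - (ag.getD atom []).sum
    if gap < 0 then none
    else cbPhase1 ag rest (deficit + gap) (used ++ ag.getD atom [])

-- B's while loop over the sorted site list: the inner while counts the current run (cnt = j - i),
-- the outer loop compares it with symm_num_dict.get(site, 0) and moves on; false = early return 2
def cbRunsGo (sy : PySem.Dict Int Int) : Int → Int → List Int → Bool
  | s, cnt, [] => decide (cnt ≤ sy.getD s 0)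
  | s, cnt, x :: rest =>
    if x == s then cbRunsGo sy s (cnt + 1) rest
    else if sy.getD s 0 < cnt then false
    else cbRunsGo sy x 1 rest

def cbRuns (sy : PySem.Dict Int Int) : List Int → Bool
  | [] => true
  | s :: rest => cbRunsGo sy s 1 rest

def check_assign_alt (atom_num : List (Int × Int)) (symm_num_dict : List (Int × Int)) (assign : List (Int × List Int)) : Int :=
  let an := PySem.Dict.ofList atom_num
  let sy := PySem.Dict.ofList symm_num_dict
  let ag := PySem.Dict.ofList assign
  match cbPhase1 ag an.items 0 [] with
  | none => 2
  | some (deficit, used) =>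
    if cbRuns sy (PySem.List.sorted used (fun x => x) false) then
      if deficit == 0 then 0 else 1
    else 2

-- ===== PRECONDITION & SPEC =====
-- helpers for Pre_: atom a is within its limit; site s is within its symmetry limit
def pvAtomOk (an : PySem.Dict Int Int) (ag : PySem.Dict Int (List Int)) (a : Int) : Bool :=
  ag.contains a && decide ((ag.getD a []).sum ≤ an.getD a 0)
def pvSiteOk (sy : PySem.Dict Int Int) (used : List Int) (s : Int) : Bool :=
  sy.contains s && decide ((used.count s : Int) ≤ sy.getD s 0)

-- Pre_ is exactly A's non-raising condition: A raises KeyError only when a lookup is actually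
-- reached, i.e. an atom key must be in assign unless an earlier atom key already breaks its limit,
-- and (when every atom is within its limit) each used site must be in symm_num_dict unless an
-- earlier distinct site already exceeds its limit.
def Pre_check_assign (atom_num : List (Int × Int)) (symm_num_dict : List (Int × Int)) (assign : List (Int × List Int)) : Prop :=
  let an := PySem.Dict.ofList atom_num
  let sy := PySem.Dict.ofList symm_num_dict
  let ag := PySem.Dict.ofList assign
  let ks := an.keys
  let used := ks.flatMap (fun a => ag.getD a [])
  let ds := PySem.Set.ofList used
  (∀ i, i < ks.length → (∀ j, j < i → pvAtomOk an ag (ks.getD j 0) = true) →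
      ag.contains (ks.getD i 0) = true) ∧
  ((∀ a ∈ ks, pvAtomOk an ag a = true) →
    ∀ i, i < ds.length → (∀ j, j < i → pvSiteOk sy used (ds.getD j 0) = true) →
      sy.contains (ds.getD i 0) = true)
instance (atom_num : List (Int × Int)) (symm_num_dict : List (Int × Int)) (assign : List (Int × List Int)) : Decidable (Pre_check_assign atom_num symm_num_dict assign) := by unfold Pre_check_assign; infer_instance

def pvWitness_check_assign : (List (Int × Int)) × (List (Int × Int)) × (List (Int × List Int)) :=
  ([(1, 2), (2, 1)], [(0, 3), (2, 1)], [(1, [0, 0, 2]), (2, [0])])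

def Spec_check_assign (atom_num : List (Int × Int)) (symm_num_dict : List (Int × Int)) (assign : List (Int × List Int)) (out : Int) : Prop := out = check_assign_alt atom_num symm_num_dict assign
instance (atom_num : List (Int × Int)) (symm_num_dict : List (Int × Int)) (assign : List (Int × List Int)) (out : Int) : Decidable (Spec_check_assign atom_num symm_num_dict assign out) := by unfold Spec_check_assign; infer_instance

-- ===== CLAIM (what is proved, stated in full; the proofs are below) =====
def Claim_equal_check_assign : Prop := ∀ (atom_num : List (Int × Int)) (symm_num_dict : List (Int × Int)) (assign : List (Int × List Int)), Dom_check_assign atom_num symm_num_dict assign → Pre_check_assign atom_num symm_num_dict assign → Spec_check_assign atom_num symm_num_dict assign (check_assign atom_num symm_num_dict assign)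
-- ===== LEMMAS AND PROOFS =====

-- characterisation of A's first loop when no break occurs / when one occurs
theorem caLoop1_spec (an : PySem.Dict Int Int) (ag : PySem.Dict Int (List Int)) :
    ∀ (ks : List Int) (anum : PySem.Dict Int Int) (used : List Int),
    (ks.any (fun atom => decide (an.getD atom 0 < (ag.getD atom []).sum)) = true →
      (caLoop1 an ag ks anum used).2.2 = 2) ∧
    (ks.any (fun atom => decide (an.getD atom 0 < (ag.getD atom []).sum)) = false →
      caLoop1 an ag ks anum used =
        (ks.foldl (fun d atom => d.insert atom (ag.getD atom []).sum) anum,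
         used ++ ks.flatMap (fun atom => ag.getD atom []), 1)) := by
  intro ks
  induction ks with
  | nil => intro anum used; simp [caLoop1]
  | cons atom rest ih =>
    intro anum used
    by_cases h : an.getD atom 0 < (ag.getD atom []).sum
    · constructor
      · intro _; simp [caLoop1, not_le.mpr h]
      · intro hfalse; simp [h] at hfalse
    · have hle : (ag.getD atom []).sum ≤ an.getD atom 0 := not_lt.mp h
      constructor
      · intro hany
        simp [h] at hany
        simpa [caLoop1, hle] using (ih _ _).1 (by simpa using hany)
      · intro hnone
        simp [h] at hnone
        have h2 := (ih (anum.insert atom (ag.getD atom []).sum) (used ++ ag.getD atom [])).2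
          (by simpa using hnone)
        simp [caLoop1, hle, h2, List.append_assoc]

-- A's second loop is an 'any' over the counter keys
theorem caLoop2_spec (cnt sy : PySem.Dict Int Int) :
    ∀ ks : List Int, caLoop2 cnt sy ks =
      (if ks.any (fun s => decide (sy.getD s 0 < cnt.getD s 0)) then 2 else 1) := by
  intro ks
  induction ks with
  | nil => simp [caLoop2]
  | cons s rest ih =>
    by_cases h : sy.getD s 0 < cnt.getD s 0
    · simp [caLoop2, h]
    · simp [caLoop2, h, ih]

-- value of the assign_num accumulator: keys inserted with a value independent of the accumulator
theorem get?_foldl_insert (f : Int → Int) :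
    ∀ (ks : List Int) (d : PySem.Dict Int Int) (k : Int),
    (ks.foldl (fun d a => d.insert a (f a)) d).get? k =
      (if k ∈ ks then some (f k) else d.get? k) := by
  intro ks
  induction ks with
  | nil => simp
  | cons a rest ih =>
    intro d k
    rw [List.foldl_cons, ih]
    by_cases hm : k ∈ rest
    · simp [hm]
    · by_cases hk : k = a
      · simp [hk, PySem.Dict.get?_insert_self]
      · simp [hm, hk, PySem.Dict.get?_insert_of_ne _ _ hk]

-- Python's dict equality of assign_num with atom_num is the per-key sum test
theorem pyDictEq_foldl (an : PySem.Dict Int Int) (ag : PySem.Dict Int (List Int))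
    (hn : an.keys.Nodup) :
    pyDictEq (an.keys.foldl (fun d atom => d.insert atom (ag.getD atom []).sum) PySem.Dict.empty) an
      = an.keys.all (fun atom => (ag.getD atom []).sum == an.getD atom 0) := by
  have hkeys : (an.keys.foldl (fun d atom => d.insert atom (ag.getD atom []).sum) PySem.Dict.empty).keys
      = an.keys := by
    rw [PySem.Dict.keys_foldl_insert]
    have h1 : PySem.Set.update (PySem.Dict.empty : PySem.Dict Int Int).keys an.keys
        = PySem.Set.ofList an.keys := rfl
    rw [h1, PySem.Set.ofList_eq_self_of_nodup an.keys hn]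
  unfold pyDictEq
  rw [hkeys]
  have hequal : PySem.Set.equal an.keys an.keys = true := by
    rw [PySem.Set.equal_iff]; intro x; rfl
  rw [hequal, Bool.true_and, Bool.eq_iff_iff, List.all_eq_true, List.all_eq_true]
  have hpt : ∀ k ∈ an.keys,
      ((an.keys.foldl (fun d atom => d.insert atom (ag.getD atom []).sum) PySem.Dict.empty).get? k
          == an.get? k)
        = ((ag.getD k []).sum == an.getD k 0) := by
    intro k hk
    rw [get?_foldl_insert _ an.keys PySem.Dict.empty k]
    simp only [hk, if_pos]
    have hsome : an.get? k = some (an.getD k 0) := by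
      rcases h : an.get? k with _ | v
      · exact absurd ((PySem.Dict.get?_eq_none_iff_not_mem_keys an k).mp h) (by simpa using hk)
      · rw [PySem.Dict.getD_eq_get?_getD, h]; rfl
    rw [hsome]
    simp
  constructor <;> intro hh x hx
  · rw [← hpt x hx]; exact hh x hx
  · rw [hpt x hx]; exact hh x hx

-- A's result characterised (for dicts with unique atom keys)
theorem checkA_char (an sy : PySem.Dict Int Int) (ag : PySem.Dict Int (List Int)) (hn : an.keys.Nodup) :
    (if (caLoop1 an ag an.keys PySem.Dict.empty []).2.2 == 1 then
       (if pyDictEq (caLoop1 an ag an.keys PySem.Dict.empty []).1 an &&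
            (caLoop2 (PySem.Dict.counter (caLoop1 an ag an.keys PySem.Dict.empty []).2.1) sy
              (PySem.Dict.counter (caLoop1 an ag an.keys PySem.Dict.empty []).2.1).keys == 1) then 0
        else caLoop2 (PySem.Dict.counter (caLoop1 an ag an.keys PySem.Dict.empty []).2.1) sy
              (PySem.Dict.counter (caLoop1 an ag an.keys PySem.Dict.empty []).2.1).keys)
     else (caLoop1 an ag an.keys PySem.Dict.empty []).2.2)
    = (if an.keys.any (fun atom => decide (an.getD atom 0 < (ag.getD atom []).sum)) then 2
       else if (an.keys.flatMap fun atom => ag.getD atom []).any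
                (fun s => decide (sy.getD s 0 <
                  ((an.keys.flatMap fun atom => ag.getD atom []).count s : Int))) then (2 : Int)
       else if an.keys.all (fun atom => ((ag.getD atom []).sum == an.getD atom 0)) then 0 else 1) := by
  by_cases hviol : an.keys.any (fun atom => decide (an.getD atom 0 < (ag.getD atom []).sum)) = true
  · have h2 := (caLoop1_spec an ag an.keys PySem.Dict.empty []).1 hviol
    rw [h2]
    simp [hviol]
  · have hf : an.keys.any (fun atom => decide (an.getD atom 0 < (ag.getD atom []).sum)) = false :=
      Bool.eq_false_iff.mpr hviol
    have hrun := (caLoop1_spec an ag an.keys PySem.Dict.empty []).2 hf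
    rw [hrun]
    simp only [List.nil_append, hf, Bool.false_eq_true, if_false]
    rw [caLoop2_spec]
    have hcnt2 : (PySem.Dict.counter (an.keys.flatMap fun atom => ag.getD atom []) :
          PySem.Dict Int Int).keys.any
          (fun s => decide (sy.getD s 0 <
            (PySem.Dict.counter (an.keys.flatMap fun atom => ag.getD atom [])).getD s 0))
        = (an.keys.flatMap fun atom => ag.getD atom []).any
            (fun s => decide (sy.getD s 0 <
              ((an.keys.flatMap fun atom => ag.getD atom []).count s : Int))) := by
      rw [PySem.Dict.keys_counter]
      rw [Bool.eq_iff_iff, List.any_eq_true, List.any_eq_true]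
      constructor
      · rintro ⟨s, hs, hp⟩
        refine ⟨s, (PySem.Set.mem_ofList _ _).mp hs, ?_⟩
        simpa [PySem.Dict.getD_counter] using hp
      · rintro ⟨s, hs, hp⟩
        refine ⟨s, (PySem.Set.mem_ofList _ _).mpr hs, ?_⟩
        simpa [PySem.Dict.getD_counter] using hp
    rw [hcnt2, pyDictEq_foldl an ag hn]
    by_cases hover : (an.keys.flatMap fun atom => ag.getD atom []).any
        (fun s => decide (sy.getD s 0 <
          ((an.keys.flatMap fun atom => ag.getD atom []).count s : Int))) = true
    · simp [hover]
    · have hov : _ = false := Bool.eq_false_iff.mpr hover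
      simp only [hov, Bool.false_eq_true, if_false]
      by_cases hall : an.keys.all (fun atom => ((ag.getD atom []).sum == an.getD atom 0)) = true
      · simp [hall]
      · simp [Bool.eq_false_iff.mpr hall]

-- B's first loop characterised
theorem cbPhase1_spec (ag : PySem.Dict Int (List Int)) :
    ∀ (ps : List (Int × Int)) (deficit : Int) (used : List Int),
    cbPhase1 ag ps deficit used =
      (if ps.any (fun p => decide (p.2 < (ag.getD p.1 []).sum)) then none
       else some (deficit + (ps.map (fun p => p.2 - (ag.getD p.1 []).sum)).sum,
                  used ++ ps.flatMap (fun p => ag.getD p.1 []))) := by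
  intro ps
  induction ps with
  | nil => intro deficit used; simp [cbPhase1]
  | cons p rest ih =>
    intro deficit used
    obtain ⟨atom, limit⟩ := p
    by_cases h : limit < (ag.getD atom []).sum
    · have hg : limit - (ag.getD atom []).sum < 0 := by omega
      simp [cbPhase1, hg, h]
    · have hg : ¬ (limit - (ag.getD atom []).sum < 0) := by omega
      simp only [cbPhase1, hg, if_false, ih]
      by_cases hany : rest.any (fun p => decide (p.2 < (ag.getD p.1 []).sum)) = true
      · simp [hany, h]
      · simp only [Bool.eq_false_iff.mpr hany, Bool.false_eq_true, if_false]
        simp [h, Bool.eq_false_iff.mpr hany, List.append_assoc, add_assoc]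

-- total deficit is zero iff every atom's sites sum exactly to its count (given no over-assignment)
theorem deficit_zero (an : PySem.Dict Int Int) (ag : PySem.Dict Int (List Int)) :
    ∀ ks : List Int,
    ks.any (fun a => decide (an.getD a 0 < (ag.getD a []).sum)) = false →
    (((ks.map (fun a => an.getD a 0 - (ag.getD a []).sum)).sum == 0)
      = ks.all (fun a => (ag.getD a []).sum == an.getD a 0)) := by
  intro ks
  induction ks with
  | nil => simp
  | cons a rest ih =>
    intro h
    simp only [List.any_cons, Bool.or_eq_false_iff] at h
    obtain ⟨h1, h2⟩ := h
    have ha : 0 ≤ an.getD a 0 - (ag.getD a []).sum := by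
      simp at h1; omega
    have hrest : 0 ≤ (rest.map (fun a => an.getD a 0 - (ag.getD a []).sum)).sum := by
      apply List.sum_nonneg
      intro x hx
      simp only [List.mem_map] at hx
      obtain ⟨b, hb, rfl⟩ := hx
      have := List.any_eq_false.mp h2 b hb
      simp at this; omega
    simp only [List.map_cons, List.sum_cons, List.all_cons, ← ih h2]
    rw [Bool.eq_iff_iff]
    simp only [Bool.and_eq_true, beq_iff_eq]
    omega

-- invariant of B's run loop: scanning a sorted tail with lower bound s and a partial run count
theorem cbRunsGo_spec (sy : PySem.Dict Int Int) :
    ∀ (rest : List Int) (s cnt : Int), (∀ x ∈ rest, s ≤ x) → rest.Pairwise (· ≤ ·) →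
    (cbRunsGo sy s cnt rest = true ↔
      (cnt + (rest.count s : Int) ≤ sy.getD s 0 ∧
       ∀ t ∈ rest, t ≠ s → (rest.count t : Int) ≤ sy.getD t 0)) := by
  intro rest
  induction rest with
  | nil => intro s cnt _ _; simp [cbRunsGo]
  | cons x rest' ih =>
    intro s cnt hlb hpw
    rw [List.pairwise_cons] at hpw
    obtain ⟨hxle, hpw'⟩ := hpw
    by_cases hxs : x = s
    · subst hxs
      rw [show cbRunsGo sy x cnt (x :: rest') = cbRunsGo sy x (cnt + 1) rest' by
        simp [cbRunsGo]]
      rw [ih x (cnt + 1) hxle hpw']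
      constructor
      · rintro ⟨h1, h2⟩
        refine ⟨by simp; omega, ?_⟩
        intro t htmem hts
        rcases List.mem_cons.mp htmem with h | h
        · exact absurd h hts
        · have := h2 t h hts
          simp [List.count_cons]
          omega
      · rintro ⟨h1, h2⟩
        constructor
        · simp at h1; omega
        · intro t htmem hts
          have := h2 t (List.mem_cons_of_mem x htmem) hts
          simp [List.count_cons] at this
          omega
    · have hsx : s < x := lt_of_le_of_ne (hlb x List.mem_cons_self) (fun h => hxs h.symm)
      have hgt : ∀ t ∈ rest', s < t := fun t ht => lt_of_lt_of_le hsx (hxle t ht)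
      have hsmem : s ∉ rest' := fun h => lt_irrefl s (hgt s h)
      have hsx' : ¬ (x == s) = true := by simp [hxs]
      rw [show cbRunsGo sy s cnt (x :: rest')
          = if sy.getD s 0 < cnt then false else cbRunsGo sy x 1 rest' by
        simp [cbRunsGo, hsx']]
      have hcs : ((x :: rest').count s : Int) = 0 := by
        simp [hxs, List.count_eq_zero.mpr hsmem]
      by_cases hcap : sy.getD s 0 < cnt
      · simp only [hcap, if_true]
        constructor
        · intro h; exact absurd h (by simp)
        · rintro ⟨h1, _⟩; rw [hcs] at h1; omega
      · simp only [hcap, if_false]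
        rw [ih x 1 hxle hpw']
        constructor
        · rintro ⟨h1, h2⟩
          refine ⟨by rw [hcs]; omega, ?_⟩
          intro t htmem hts
          rcases List.mem_cons.mp htmem with h | h
          · subst h
            simp
            omega
          · by_cases htx : t = x
            · subst htx
              simp
              omega
            · have := h2 t h htx
              simp [List.count_cons]
              omega
        · rintro ⟨h1, h2⟩
          constructor
          · have := h2 x List.mem_cons_self (by omega)
            simp at this
            omega
          · intro t htmem htx
            have hts : t ≠ s := fun h => lt_irrefl s (h ▸ hgt t htmem)
            have := h2 t (List.mem_cons_of_mem x htmem) hts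
            simp [List.count_cons] at this ⊢
            omega

-- B's run scan over a sorted list checks every element's multiplicity against its limit
theorem cbRuns_spec (sy : PySem.Dict Int Int) :
    ∀ l : List Int, l.Pairwise (· ≤ ·) →
    (cbRuns sy l = true ↔ ∀ s ∈ l, (l.count s : Int) ≤ sy.getD s 0) := by
  intro l hpw
  cases l with
  | nil => simp [cbRuns]
  | cons s rest =>
    rw [List.pairwise_cons] at hpw
    obtain ⟨hle, hrest⟩ := hpw
    rw [show cbRuns sy (s :: rest) = cbRunsGo sy s 1 rest from rfl]
    rw [cbRunsGo_spec sy rest s 1 hle hrest]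
    constructor
    · rintro ⟨h1, h2⟩ t htmem
      by_cases hts : t = s
      · subst hts
        simp
        omega
      · rcases List.mem_cons.mp htmem with h | h
        · exact absurd h hts
        · have := h2 t h hts
          simp [List.count_cons]
          omega
    · intro hall
      constructor
      · have := hall s List.mem_cons_self
        simp at this
        omega
      · intro t htmem hts
        have := hall t (List.mem_cons_of_mem s htmem)
        simp [List.count_cons] at this
        omega

-- B's result characterised (same right-hand side as checkA_char)
theorem checkB_char (an sy : PySem.Dict Int Int) (ag : PySem.Dict Int (List Int)) (hn : an.keys.Nodup) :
    (match cbPhase1 ag an.items 0 [] with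
     | none => (2 : Int)
     | some (deficit, used) =>
       if cbRuns sy (PySem.List.sorted used (fun x => x) false) then
         if deficit == 0 then 0 else 1
       else 2)
    = (if an.keys.any (fun atom => decide (an.getD atom 0 < (ag.getD atom []).sum)) then 2
       else if (an.keys.flatMap fun atom => ag.getD atom []).any
                (fun s => decide (sy.getD s 0 <
                  ((an.keys.flatMap fun atom => ag.getD atom []).count s : Int))) then (2 : Int)
       else if an.keys.all (fun atom => ((ag.getD atom []).sum == an.getD atom 0)) then 0 else 1) := by
  have hitems : an.items = an.keys.map (fun k => (k, an.getD k 0)) :=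
    PySem.Dict.items_eq_map_keys an hn 0
  rw [cbPhase1_spec, hitems]
  rw [List.any_map, List.map_map, List.flatMap_map]
  simp only [Function.comp_def]
  by_cases hviol : an.keys.any (fun a => decide (an.getD a 0 < (ag.getD a []).sum)) = true
  · simp [hviol]
  · have hf : _ = false := Bool.eq_false_iff.mpr hviol
    simp only [hf, Bool.false_eq_true, if_false, List.nil_append]
    set used := an.keys.flatMap (fun a => ag.getD a []) with hused
    have hperm : (PySem.List.sorted used (fun x => x) false).Perm used :=
      PySem.List.sorted_perm used (fun x => x) false
    have hpw : (PySem.List.sorted used (fun x => x) false).Pairwise (· ≤ ·) := by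
      simpa using PySem.List.sorted_pairwise used (fun x => x)
    have hruns := cbRuns_spec sy _ hpw
    by_cases hover : used.any (fun s => decide (sy.getD s 0 < (used.count s : Int))) = true
    · -- some site over its limit → cbRuns is false
      have hrf : cbRuns sy (PySem.List.sorted used (fun x => x) false) = false := by
        rw [Bool.eq_false_iff]
        intro htrue
        obtain ⟨s, hs, hp⟩ := List.any_eq_true.mp hover
        have := (hruns.mp htrue) s (hperm.mem_iff.mpr hs)
        rw [hperm.count_eq] at this
        simp at hp; omega
      simp [hrf, hover]
    · have hrt : cbRuns sy (PySem.List.sorted used (fun x => x) false) = true := by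
        rw [hruns]
        intro s hsmem
        have hsu : s ∈ used := hperm.mem_iff.mp hsmem
        have := List.any_eq_false.mp (Bool.eq_false_iff.mpr hover) s hsu
        rw [hperm.count_eq]
        simp at this; omega
      have hd0 := deficit_zero an ag an.keys hf
      simp only [hrt, if_true, Bool.eq_false_iff.mpr hover, Bool.false_eq_true, if_false]
      rw [← hd0]
      by_cases hz : ((an.keys.map (fun a => an.getD a 0 - (ag.getD a []).sum)).sum == 0) = true
      · simp [hz]
      · simp [Bool.eq_false_iff.mpr hz]

theorem check_assign_eq_alt (atom_num symm_num_dict : List (Int × Int)) (assign : List (Int × List Int)) :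
    check_assign atom_num symm_num_dict assign = check_assign_alt atom_num symm_num_dict assign := by
  unfold check_assign check_assign_alt
  rw [checkA_char (PySem.Dict.ofList atom_num) (PySem.Dict.ofList symm_num_dict)
    (PySem.Dict.ofList assign) (PySem.Dict.nodup_keys_ofList atom_num)]
  rw [checkB_char _ _ _ (PySem.Dict.nodup_keys_ofList atom_num)]

-- ===== VERDICT (by name: the statement is the Claim_ definition above) =====
theorem check_assign_spec : Claim_equal_check_assign := by
  intro atom_num symm_num_dict assign _ _
  unfold Spec_check_assign
  exact check_assign_eq_alt atom_num symm_num_dict assign
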